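-- pv_equiv track=rewrite | github.com/Owen-3456/Torrent-Creator | src/backend/main.py | apply_movie_template
-- ===== SOURCE A (Python) =====
-- def apply_movie_template(template: str, details: dict) -> str:
--     """Apply the movie naming template with the given details.
--
--     Replaces placeholders like {title}, {year}, etc. with actual values.
--     Dots in the title are preserved (spaces are converted to dots).
--     """
--     title = details.get("name", "Unknown").replace(" ", ".")
--     year = details.get("year", "")
--     quality = details.get("resolution", "")
--     source = details.get("source", "")
--     # Map display codec names to template-friendly names
--     codec = details.get("video_codec", "")
--     group = details.get("release_group", "")
--
--     result = template
--     result = result.replace("{title}", title)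
--     result = result.replace("{year}", year)
--     result = result.replace("{quality}", quality)
--     result = result.replace("{source}", source)
--     result = result.replace("{codec}", codec)
--     result = result.replace("{group}", group)
--
--     # Remove any unreplaced template variables (from empty fields)
--     # e.g. ".." from empty year → single dot
--     while ".." in result:
--         result = result.replace("..", ".")
--     # Remove trailing dots before the group separator
--     result = result.replace(".-", "-")
--     # Remove leading/trailing dots
--     result = result.strip(".")
--
--     return result
-- ===== SOURCE B (Python) =====
-- def apply_movie_template(template: str, details: dict) -> str:
--     """Same result as the original: substitute placeholders, then normalize
--     dots in a single left-to-right scan instead of repeated replace passes."""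
--     substitutions = {
--         "{title}": details.get("name", "Unknown").replace(" ", "."),
--         "{year}": details.get("year", ""),
--         "{quality}": details.get("resolution", ""),
--         "{source}": details.get("source", ""),
--         "{codec}": details.get("video_codec", ""),
--         "{group}": details.get("release_group", ""),
--     }
--     s = template
--     for placeholder, value in substitutions.items():
--         s = s.replace(placeholder, value)
--
--     # One pass: a maximal run of dots becomes a single dot, unless the run is
--     # leading, trailing, or immediately followed by '-' (then it disappears).
--     out = []
--     run = 0
--     for ch in s:
--         if ch == ".":
--             run += 1
--         else:
--             if run and out and ch != "-":
--                 out.append(".")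
--             run = 0
--             out.append(ch)
--     return "".join(out)
-- ===== Notes on version B (the rewrite author's own statement) =====
-- stated objective: simpler
-- what changed: The multi-pass normalization tail (a 'while ".." in s' replace loop, a global '.-'->'-' replace, and strip('.')) is replaced by one left-to-right scan that tracks maximal dot runs and emits a single dot only for an interior run not followed by '-'; the placeholder substitutions are driven by a dict loop instead of six repeated statements.
import Mathlib
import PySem

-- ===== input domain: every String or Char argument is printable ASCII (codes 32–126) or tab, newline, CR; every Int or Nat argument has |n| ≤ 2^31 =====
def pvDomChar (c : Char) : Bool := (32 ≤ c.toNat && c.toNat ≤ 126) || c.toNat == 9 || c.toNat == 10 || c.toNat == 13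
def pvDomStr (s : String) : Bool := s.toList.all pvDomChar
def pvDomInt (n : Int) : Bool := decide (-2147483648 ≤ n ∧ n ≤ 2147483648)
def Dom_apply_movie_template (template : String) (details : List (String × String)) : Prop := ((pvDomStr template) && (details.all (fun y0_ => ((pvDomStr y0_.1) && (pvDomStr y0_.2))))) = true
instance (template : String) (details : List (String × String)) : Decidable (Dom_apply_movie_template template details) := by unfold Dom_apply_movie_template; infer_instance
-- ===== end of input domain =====

-- B replaces the multi-pass dot normalization (while-loop collapse, '.-' fixup, strip) by a
-- single left-to-right scan over the substituted string; objective: simpler (one pass).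


-- ===== PORT A =====
-- `pvRepl2 a b c l` is `l.replace([a,b] -> [c])` (two-char pattern, one-char replacement),
-- stated structurally; used to prove termination of the `while ".." in result` loop.
def pvRepl2 (a b c : Char) : List Char → List Char
  | x :: y :: t => if x = a ∧ y = b then c :: pvRepl2 a b c t else x :: pvRepl2 a b c (y :: t)
  | [x] => [x]
  | [] => []

theorem pvGo_succ_cons (old new : List Char) (fuel : Nat) (c : Char) (t acc : List Char) :
    PySem.Chars.replace.go old new (fuel + 1) (c :: t) acc =
      if old.isPrefixOf (c :: t) then
        PySem.Chars.replace.go old new fuel (List.drop old.length (c :: t)) (new.reverse ++ acc)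
      else PySem.Chars.replace.go old new fuel t (c :: acc) := rfl

theorem pvRepl2_go (a b c : Char) (fuel : Nat) (l acc : List Char) (h : l.length ≤ fuel) :
    PySem.Chars.replace.go [a, b] [c] fuel l acc = acc.reverse ++ pvRepl2 a b c l := by
  induction fuel generalizing l acc with
  | zero =>
    simp at h; subst h
    show acc.reverse ++ [] = acc.reverse ++ pvRepl2 a b c []
    simp [pvRepl2]
  | succ fuel ih =>
    match l with
    | [] => show acc.reverse = acc.reverse ++ pvRepl2 a b c []; simp [pvRepl2]
    | [x] =>
      rw [pvGo_succ_cons]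
      have hpre : ([a, b].isPrefixOf [x]) = false := by
        simp [List.isPrefixOf]
      rw [hpre, if_neg (by simp), ih [] (x :: acc) (by simp)]
      simp [pvRepl2]
    | x :: y :: t =>
      rw [pvGo_succ_cons]
      by_cases hxy : x = a ∧ y = b
      · have hpre : [a, b].isPrefixOf (x :: y :: t) = true := by
          simp [List.isPrefixOf, hxy.1, hxy.2]
        have hdrop : List.drop [a, b].length (x :: y :: t) = t := rfl
        rw [hpre, if_pos rfl, hdrop, ih t ([c].reverse ++ acc) (by simp at h ⊢; omega)]
        simp [pvRepl2, hxy]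
      · have hpre : ([a, b].isPrefixOf (x :: y :: t)) = false := by
          simp [List.isPrefixOf]; intro h1 h2; exact absurd ⟨h1.symm, h2.symm⟩ hxy
        rw [hpre, if_neg (by simp), ih (y :: t) (x :: acc) (by simp at h ⊢; omega)]
        simp [pvRepl2, hxy]

theorem pvReplace_eq_repl2 (a b c : Char) (l : List Char) :
    PySem.Chars.replace l [a, b] [c] = pvRepl2 a b c l := by
  simp only [PySem.Chars.replace, List.isEmpty]
  rw [pvRepl2_go a b c l.length l [] le_rfl]
  simp

theorem pvRepl2_length_le (a b c : Char) (l : List Char) :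
    (pvRepl2 a b c l).length ≤ l.length := by
  induction l using pvRepl2.induct a b with
  | case1 x y t hxy ih => simp [pvRepl2, hxy]; omega
  | case2 x y t hxy ih => simp [pvRepl2, hxy]; simp at ih; omega
  | case3 x => simp [pvRepl2]
  | case4 => simp [pvRepl2]

theorem pvRepl2_dd_length_lt (l : List Char) (h : ['.', '.'] <:+: l) :
    (pvRepl2 '.' '.' '.' l).length < l.length := by
  induction l using pvRepl2.induct '.' '.' with
  | case1 x y t hxy ih =>
    have := pvRepl2_length_le '.' '.' '.' t
    simp [pvRepl2, hxy]; omega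
  | case2 x y t hxy ih =>
    have htail : ['.', '.'] <:+: (y :: t) := by
      obtain ⟨u, v, huv⟩ := h
      match u with
      | [] => simp at huv; exact absurd ⟨huv.1.symm, huv.2.1.symm⟩ hxy
      | _ :: u' =>
        simp at huv
        exact ⟨u', v, by simpa using huv.2⟩
    have := ih htail
    simp [pvRepl2, hxy]; simp at this; omega
  | case3 x => exact absurd (List.IsInfix.length_le h) (by simp)
  | case4 => exact absurd (List.IsInfix.length_le h) (by simp)

theorem pvCollapse_step_lt (s : String) (h : PySem.Str.isIn ".." s = true) :
    (PySem.Str.replace s ".." ".").toList.length < s.toList.length := by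
  rw [PySem.Str.toList_replace]
  have h2 : (".." : String).toList = ['.', '.'] := by decide
  have h1 : ("." : String).toList = ['.'] := by decide
  rw [h1, h2, pvReplace_eq_repl2]
  exact pvRepl2_dd_length_lt _ (by
    rw [PySem.Str.isIn_eq, h2] at h
    exact (PySem.Chars.isIn_iff_infix _ _).mp h)

-- `while ".." in result: result = result.replace("..", ".")`
def pvWhileCollapse (s : String) : String :=
  if PySem.Str.isIn ".." s then pvWhileCollapse (PySem.Str.replace s ".." ".") else s
termination_by s.toList.length
decreasing_by exact pvCollapse_step_lt s (by assumption)

def apply_movie_template (template : String) (details : List (String × String)) : String :=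
  let title := PySem.Str.replace (PySem.Dict.getD (PySem.Dict.mk details) "name" "Unknown") " " "."
  let year := PySem.Dict.getD (PySem.Dict.mk details) "year" ""
  let quality := PySem.Dict.getD (PySem.Dict.mk details) "resolution" ""
  let source := PySem.Dict.getD (PySem.Dict.mk details) "source" ""
  let codec := PySem.Dict.getD (PySem.Dict.mk details) "video_codec" ""
  let group := PySem.Dict.getD (PySem.Dict.mk details) "release_group" ""
  let result := template
  let result := PySem.Str.replace result "{title}" title
  let result := PySem.Str.replace result "{year}" year
  let result := PySem.Str.replace result "{quality}" quality
  let result := PySem.Str.replace result "{source}" source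
  let result := PySem.Str.replace result "{codec}" codec
  let result := PySem.Str.replace result "{group}" group
  let result := pvWhileCollapse result
  let result := PySem.Str.replace result ".-" "-"
  let result := PySem.Str.stripChars result "."
  result

-- ===== PORT B =====
def apply_movie_template_alt (template : String) (details : List (String × String)) : String :=
  let substitutions : List (String × String) :=
    [("{title}", PySem.Str.replace (PySem.Dict.getD (PySem.Dict.mk details) "name" "Unknown") " " "."),
     ("{year}", PySem.Dict.getD (PySem.Dict.mk details) "year" ""),
     ("{quality}", PySem.Dict.getD (PySem.Dict.mk details) "resolution" ""),
     ("{source}", PySem.Dict.getD (PySem.Dict.mk details) "source" ""),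
     ("{codec}", PySem.Dict.getD (PySem.Dict.mk details) "video_codec" ""),
     ("{group}", PySem.Dict.getD (PySem.Dict.mk details) "release_group" "")]
  let s := substitutions.foldl (fun s pv => PySem.Str.replace s pv.1 pv.2) template
  let st := s.toList.foldl
    (fun (p : List Char × Nat) ch =>
      if ch = '.' then (p.1, p.2 + 1)
      else ((if p.2 ≠ 0 ∧ p.1 ≠ [] ∧ ch ≠ '-' then p.1 ++ ['.'] else p.1) ++ [ch], 0))
    ([], 0)
  String.ofList st.1

-- ===== PRECONDITION & SPEC =====
def Spec_apply_movie_template (template : String) (details : List (String × String)) (out : String) : Prop := out = apply_movie_template_alt template details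
instance (template : String) (details : List (String × String)) (out : String) : Decidable (Spec_apply_movie_template template details out) := by unfold Spec_apply_movie_template; infer_instance

-- ===== CLAIM (what is proved, stated in full; the proofs are below) =====
def Claim_equal_apply_movie_template : Prop := ∀ (template : String) (details : List (String × String)), Dom_apply_movie_template template details → Spec_apply_movie_template template details (apply_movie_template template details)

-- ===== LEMMAS AND PROOFS =====

-- collapse every run of dots to a single dot (flag: previous char was a dot)
def pvSq (b : Bool) : List Char → List Char
  | [] => []
  | c :: t => if c = '.' then (if b then pvSq true t else '.' :: pvSq true t) else c :: pvSq false t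

-- the fixpoint of the collapse loop, on lists
def pvCLoop (l : List Char) : List Char :=
  if PySem.Chars.isIn ['.', '.'] l then pvCLoop (pvRepl2 '.' '.' '.' l) else l
termination_by l.length
decreasing_by exact pvRepl2_dd_length_lt l ((PySem.Chars.isIn_iff_infix _ _).mp (by assumption))

-- right strip of dots
def pvRS (l : List Char) : List Char := (l.reverse.dropWhile (· == '.')).reverse

-- middle normalizer: flag = a dot run is pending; output what B emits from here on,
-- assuming something non-empty was already emitted
def pvMid (b : Bool) : List Char → List Char
  | [] => []
  | c :: t =>
    if c = '.' then pvMid true t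
    else (if b then (if c = '-' then [c] else ['.', c]) else [c]) ++ pvMid false t

-- B's scan, recursively
def pvBRec : List Char → List Char → Nat → List Char
  | [], out, _ => out
  | c :: t, out, run =>
    if c = '.' then pvBRec t out (run + 1)
    else pvBRec t ((if run ≠ 0 ∧ out ≠ [] ∧ c ≠ '-' then out ++ ['.'] else out) ++ [c]) 0

theorem pvFold_eq_bRec (l : List Char) (out : List Char) (run : Nat) :
    (l.foldl
      (fun (p : List Char × Nat) ch =>
        if ch = '.' then (p.1, p.2 + 1)
        else ((if p.2 ≠ 0 ∧ p.1 ≠ [] ∧ ch ≠ '-' then p.1 ++ ['.'] else p.1) ++ [ch], 0))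
      (out, run)).1 = pvBRec l out run := by
  induction l generalizing out run with
  | nil => simp [pvBRec]
  | cons c t ih =>
    simp only [List.foldl_cons, pvBRec]
    split_ifs <;> simp_all

theorem pvWhileCollapse_toList (s : String) :
    (pvWhileCollapse s).toList = pvCLoop s.toList := by
  fun_induction pvWhileCollapse s with
  | case1 s h ih =>
    have hc : PySem.Chars.isIn ['.', '.'] s.toList = true := by
      rw [← show (".." : String).toList = ['.', '.'] from by decide, ← PySem.Str.isIn_eq]
      exact h
    rw [pvCLoop, if_pos hc, ih]
    congr 1
    rw [PySem.Str.toList_replace,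
      show (".." : String).toList = ['.', '.'] from by decide,
      show ("." : String).toList = ['.'] from by decide,
      pvReplace_eq_repl2]
  | case2 s h =>
    have hc : ¬ (PySem.Chars.isIn ['.', '.'] s.toList = true) := by
      rw [← show (".." : String).toList = ['.', '.'] from by decide, ← PySem.Str.isIn_eq]
      exact h
    rw [pvCLoop, if_neg hc]

theorem pvSq_repl2 (l : List Char) : ∀ (b : Bool),
    pvSq b (pvRepl2 '.' '.' '.' l) = pvSq b l := by
  induction l using pvRepl2.induct '.' '.' with
  | case1 x y t hxy ih =>
    intro b
    obtain ⟨rfl, rfl⟩ := hxy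
    cases b <;> simp [pvRepl2, pvSq, ih]
  | case2 x y t hxy ih =>
    intro b
    by_cases hx : x = '.'
    · have hy : y ≠ '.' := fun hy => hxy ⟨hx, hy⟩
      cases b <;> simp [pvRepl2, pvSq, hx, hy, ih]
    · cases b <;> simp [pvRepl2, pvSq, hx, ih]
  | case3 x => intro b; simp [pvRepl2]
  | case4 => intro b; simp [pvRepl2]

theorem pvSq_noadj (l : List Char) (h : ¬ (['.', '.'] <:+: l)) : pvSq false l = l := by
  induction l with
  | nil => rfl
  | cons c t ih =>
    have htail : ¬ (['.', '.'] <:+: t) := by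
      intro ⟨u, v, huv⟩; exact h ⟨c :: u, v, by simp [huv]⟩
    by_cases hc : c = '.'
    · subst hc
      match t with
      | [] => rfl
      | d :: u =>
        have hd : d ≠ '.' := by
          intro hd; exact h ⟨[], u, by simp [hd]⟩
        have := ih htail
        simp [pvSq, hd] at this ⊢
        exact this
    · simp [pvSq, hc, ih htail]

theorem pvCLoop_eq_sq (l : List Char) : pvCLoop l = pvSq false l := by
  fun_induction pvCLoop l with
  | case1 l h ih => rw [ih, pvSq_repl2]
  | case2 l h =>
    exact (pvSq_noadj l ((PySem.Chars.isIn_eq_false_iff _ _).mp (by simpa using h))).symm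

theorem pvRS_cons_ne (c : Char) (u : List Char) (h : c ≠ '.') : pvRS (c :: u) = c :: pvRS u := by
  unfold pvRS
  rw [List.reverse_cons, List.dropWhile_append]
  split
  · next he =>
    simp only [List.isEmpty_iff] at he
    simp [he, h]
  · simp

theorem pvRS_cons_of_ne_nil (c : Char) (u : List Char) (h : pvRS u ≠ []) :
    pvRS (c :: u) = c :: pvRS u := by
  unfold pvRS at h ⊢
  rw [List.reverse_cons, List.dropWhile_append]
  split
  · next he =>
    simp at he h
    obtain ⟨x, hx, hne⟩ := h
    exact absurd (he x hx) hne
  · simp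

theorem pvStripChars_eq (l : List Char) :
    PySem.Chars.stripChars l ['.'] = pvRS (l.dropWhile (· == '.')) := by
  have hp : (fun c => List.contains ['.'] c) = (fun c : Char => c == '.') := by
    funext c
    rw [List.contains_cons, Bool.beq_comm]
    simp
  simp only [PySem.Chars.stripChars, pvRS, hp]

theorem pvRepl2_cons_ne (a b c x : Char) (u : List Char) (hx : x ≠ a) :
    pvRepl2 a b c (x :: u) = x :: pvRepl2 a b c u := by
  match u with
  | [] => simp [pvRepl2]
  | y :: t =>
    simp only [pvRepl2]
    rw [if_neg (fun h => hx h.1)]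

theorem pvRepl2_match (a b c : Char) (u : List Char) :
    pvRepl2 a b c (a :: b :: u) = c :: pvRepl2 a b c u := by
  simp [pvRepl2]

theorem pvRepl2_cons_cons_ne (a b c x y : Char) (u : List Char) (hy : y ≠ b) :
    pvRepl2 a b c (x :: y :: u) = x :: pvRepl2 a b c (y :: u) := by
  simp only [pvRepl2]
  rw [if_neg (fun h => hy h.2)]

theorem pvMid_eq (l : List Char) :
    pvMid true l = pvRS (pvRepl2 '.' '-' '-' ('.' :: pvSq true l)) ∧
    pvMid false l = pvRS (pvRepl2 '.' '-' '-' (pvSq false l)) := by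
  induction l with
  | nil => constructor <;> simp [pvMid, pvSq, pvRepl2, pvRS]
  | cons c t ih =>
    by_cases hc : c = '.'
    · subst hc
      constructor
      · show pvMid true t = _
        rw [show pvSq true ('.' :: t) = pvSq true t from by simp [pvSq]]
        exact ih.1
      · show pvMid true t = _
        rw [show pvSq false ('.' :: t) = '.' :: pvSq true t from by simp [pvSq]]
        exact ih.1
    · have hsqt : pvSq true (c :: t) = c :: pvSq false t := by simp [pvSq, hc]
      have hsqf : pvSq false (c :: t) = c :: pvSq false t := by simp [pvSq, hc]
      by_cases hm : c = '-'
      · subst hm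
        constructor
        · rw [hsqt, pvRepl2_match, pvRS_cons_ne _ _ (by decide)]
          simp [pvMid, ih.2]
        · rw [hsqf, pvRepl2_cons_ne _ _ _ _ _ (by decide),
            pvRS_cons_ne _ _ (by decide)]
          simp [pvMid, ih.2]
      · constructor
        · rw [hsqt, pvRepl2_cons_cons_ne _ _ _ _ _ _ hm, pvRepl2_cons_ne _ _ _ _ _ hc]
          rw [pvRS_cons_of_ne_nil _ _ (by rw [pvRS_cons_ne _ _ hc]; simp),
            pvRS_cons_ne _ _ hc]
          simp [pvMid, hc, hm, ih.2]
        · rw [hsqf, pvRepl2_cons_ne _ _ _ _ _ hc, pvRS_cons_ne _ _ hc]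
          simp [pvMid, hc, ih.2]

theorem pvBRec_mid (l : List Char) : ∀ (out : List Char) (run : Nat), out ≠ [] →
    pvBRec l out run = out ++ pvMid (run != 0) l := by
  induction l with
  | nil => intro out run h; simp [pvBRec, pvMid]
  | cons c t ih =>
    intro out run h
    by_cases hc : c = '.'
    · subst hc
      rw [show pvBRec ('.' :: t) out run = pvBRec t out (run + 1) from by simp [pvBRec],
        ih out (run + 1) h]
      simp [pvMid]
    · rw [show pvBRec (c :: t) out run
          = pvBRec t ((if run ≠ 0 ∧ out ≠ [] ∧ c ≠ '-' then out ++ ['.'] else out) ++ [c]) 0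
        from by simp [pvBRec, hc], ih _ 0 (by simp)]
      by_cases hr : run = 0 <;> by_cases hm : c = '-' <;>
        simp [pvMid, hc, hr, hm, h]

theorem pvLead (t : List Char) : ∀ (r : Nat),
    pvBRec t [] (r + 1) =
      pvRS ((pvRepl2 '.' '-' '-' ('.' :: pvSq true t)).dropWhile (· == '.')) := by
  induction t with
  | nil => intro r; simp [pvBRec, pvSq, pvRepl2, pvRS]
  | cons c u ih =>
    intro r
    by_cases hc : c = '.'
    · subst hc
      rw [show pvBRec ('.' :: u) [] (r + 1) = pvBRec u [] (r + 2) from by simp [pvBRec],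
        show pvSq true ('.' :: u) = pvSq true u from by simp [pvSq]]
      exact ih (r + 1)
    · have hsqt : pvSq true (c :: u) = c :: pvSq false u := by simp [pvSq, hc]
      rw [show pvBRec (c :: u) [] (r + 1) = pvBRec u [c] 0 from by simp [pvBRec, hc],
        pvBRec_mid u [c] 0 (by simp), hsqt]
      by_cases hm : c = '-'
      · subst hm
        rw [pvRepl2_match,
          show List.dropWhile (· == '.') ('-' :: pvRepl2 '.' '-' '-' (pvSq false u))
            = '-' :: pvRepl2 '.' '-' '-' (pvSq false u) from by simp,
          pvRS_cons_ne _ _ (by decide)]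
        simp [(pvMid_eq u).2]
      · rw [pvRepl2_cons_cons_ne _ _ _ _ _ _ hm, pvRepl2_cons_ne _ _ _ _ _ hc,
          show List.dropWhile (· == '.') ('.' :: c :: pvRepl2 '.' '-' '-' (pvSq false u))
            = c :: pvRepl2 '.' '-' '-' (pvSq false u) from by simp [hc],
          pvRS_cons_ne _ _ hc]
        simp [(pvMid_eq u).2]

theorem pvNorm (l : List Char) :
    pvRS ((pvRepl2 '.' '-' '-' (pvSq false l)).dropWhile (· == '.')) = pvBRec l [] 0 := by
  match l with
  | [] => simp [pvBRec, pvSq, pvRepl2, pvRS]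
  | '.' :: t =>
    rw [show pvSq false ('.' :: t) = '.' :: pvSq true t from by simp [pvSq],
      show pvBRec ('.' :: t) [] 0 = pvBRec t [] 1 from by simp [pvBRec]]
    exact (pvLead t 0).symm
  | c :: t =>
    by_cases hc : c = '.'
    · subst hc
      rw [show pvSq false ('.' :: t) = '.' :: pvSq true t from by simp [pvSq],
        show pvBRec ('.' :: t) [] 0 = pvBRec t [] 1 from by simp [pvBRec]]
      exact (pvLead t 0).symm
    · rw [show pvSq false (c :: t) = c :: pvSq false t from by simp [pvSq, hc],
        pvRepl2_cons_ne _ _ _ _ _ hc,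
        show List.dropWhile (· == '.') (c :: pvRepl2 '.' '-' '-' (pvSq false t))
          = c :: pvRepl2 '.' '-' '-' (pvSq false t) from by simp [hc],
        pvRS_cons_ne _ _ hc,
        show pvBRec (c :: t) [] 0 = pvBRec t [c] 0 from by simp [pvBRec, hc],
        pvBRec_mid t [c] 0 (by simp)]
      simp [(pvMid_eq t).2]

-- ===== VERDICT (by name: the statement is the Claim_ definition above) =====
theorem apply_movie_template_spec : Claim_equal_apply_movie_template := by
  intro template details _
  unfold Spec_apply_movie_template apply_movie_template apply_movie_template_alt
  simp only [List.foldl_cons, List.foldl_nil]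
  rw [pvFold_eq_bRec]
  refine String.toList_inj.mp ?_
  rw [String.toList_ofList, PySem.Str.toList_stripChars, PySem.Str.toList_replace,
    pvWhileCollapse_toList, pvCLoop_eq_sq,
    show (".-" : String).toList = ['.', '-'] from by decide,
    show ("-" : String).toList = ['-'] from by decide,
    show ("." : String).toList = ['.'] from by decide,
    pvReplace_eq_repl2, pvStripChars_eq, pvNorm]
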